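-- pv_equiv track=rewrite | github.com/joeturasztdg-blip/DataProcessingApp | Data Processing Application.py | trailing_empty_run
-- ===== SOURCE A (Python) =====
-- def trailing_empty_run(row):
--     cnt = 0
--     for c in reversed(row):
--         if str(c).strip() == "":
--             cnt += 1
--         else:
--             break
--     return cnt
-- ===== SOURCE B (Python) =====
-- def trailing_empty_run(row):
--     n = len(row)
--     last = -1
--     for i, c in enumerate(row):
--         if str(c).strip() != "":
--             last = i
--     return n - 1 - last
-- ===== Notes on version B (the rewrite author's own statement) =====
-- stated objective: alternative
-- what changed: Replaces the reverse early-break loop with a single forward pass tracking the index of the last non-empty cell, returning len(row)-1-last by arithmetic.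
import Mathlib
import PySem

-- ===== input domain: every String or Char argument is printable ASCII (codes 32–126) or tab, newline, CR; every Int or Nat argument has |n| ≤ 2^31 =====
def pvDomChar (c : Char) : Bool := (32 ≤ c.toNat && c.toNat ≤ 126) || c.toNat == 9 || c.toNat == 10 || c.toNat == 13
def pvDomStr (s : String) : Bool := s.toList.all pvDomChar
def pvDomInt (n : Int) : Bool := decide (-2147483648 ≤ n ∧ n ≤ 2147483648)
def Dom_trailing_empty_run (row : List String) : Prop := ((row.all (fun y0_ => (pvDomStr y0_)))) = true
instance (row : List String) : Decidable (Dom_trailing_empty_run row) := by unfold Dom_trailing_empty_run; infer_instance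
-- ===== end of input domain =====

-- B replaces A's reverse early-break loop by a forward pass tracking the last
-- non-empty index and returns len(row) - 1 - last (alternative decomposition).

-- ===== PORT A =====
-- 'for c in reversed(row): if str(c).strip() == "": cnt += 1 else: break'
-- as structural recursion over row.reverse (the break stops the count).
def trailing_empty_run_go : List String → Int
  | [] => 0
  | c :: rest => if PySem.Str.strip c = "" then 1 + trailing_empty_run_go rest else 0

def trailing_empty_run (row : List String) : Int :=
  trailing_empty_run_go row.reverse

-- ===== PORT B =====
-- forward pass: last = index of the last cell with str(c).strip() != "", start -1
def trailing_empty_run_alt (row : List String) : Int :=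
  let n : Int := row.length
  let last : Int := (PySem.List.enumerate row).foldl
    (fun last p => if PySem.Str.strip p.2 ≠ "" then p.1 else last) (-1)
  n - 1 - last

-- ===== PRECONDITION & SPEC =====
def Spec_trailing_empty_run (row : List String) (out : Int) : Prop := out = trailing_empty_run_alt row
instance (row : List String) (out : Int) : Decidable (Spec_trailing_empty_run row out) := by unfold Spec_trailing_empty_run; infer_instance

-- ===== CLAIM (what is proved, stated in full; the proofs are below) =====
def Claim_equal_trailing_empty_run : Prop := ∀ (row : List String), Dom_trailing_empty_run row → Spec_trailing_empty_run row (trailing_empty_run row)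

-- ===== LEMMAS AND PROOFS =====
theorem trailing_empty_run_eq (row : List String) :
    trailing_empty_run row = trailing_empty_run_alt row := by
  induction row using List.reverseRecOn with
  | nil => decide
  | append_singleton xs c ih =>
    simp only [trailing_empty_run, trailing_empty_run_alt,
      PySem.List.enumerate_append, List.foldl_append, List.reverse_append,
      List.reverse_singleton, List.singleton_append, List.length_append,
      List.length_singleton, PySem.List.enumerate_cons, PySem.List.enumerate_nil,
      List.foldl_cons, List.foldl_nil] at *
    by_cases h : PySem.Str.strip c = ""
    · simp only [trailing_empty_run_go, h]
      rw [ih]; push_cast; ring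
    · simp only [trailing_empty_run_go, if_neg h, if_pos h]
      push_cast; ring

-- ===== VERDICT (by name: the statement is the Claim_ definition above) =====
theorem trailing_empty_run_spec : Claim_equal_trailing_empty_run := by
  intro row _
  unfold Spec_trailing_empty_run
  exact trailing_empty_run_eq row
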